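-- pv_equiv track=rewrite | github.com/KeXu1739/algo | algoHelper.py | maxLengthSubArraySumBelowTarget
-- ===== SOURCE A (Python) =====
-- def maxLengthSubArraySumBelowTarget(arr, target):
--     # 给一个数组arr，无序，每个值可能正负0，再给另一个正数target，求arr所有子数组中元素和相加小于等于target的最长子数组长度，需要时间复杂度O(N),空间O(1)
--     minSum = [None for _ in range(len(arr))]
--     minSumEnd = [0 for _ in range(len(arr))]
--     minSum[-1] = arr[-1]
--     minSumEnd[-1] = len(arr) - 1
--     for i in range(len(arr)-2, -1, -1):
--         if minSum[i + 1] < 0: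
--             minSum[i] = arr[i] + minSum[i + 1]
--             minSumEnd[i] = minSumEnd[i+1]
--         else:
--             minSum[i] = arr[i]
--             minSumEnd[i] = i
--
--     end = summ = res = 0
--     for i in range(len(arr)):
--         while end < len(arr) and summ + minSum[end] <= target:
--             summ += minSum[end]
--             end = minSumEnd[end] + 1
--         res = max(res, end - i)
--         if end > i:
--             summ -= arr[i]
--         else:
--             end = i + 1
--
--     return res
-- ===== SOURCE B (Python) =====
-- def maxLengthSubArraySumBelowTarget(arr, target):
--     # Prefix sums P, running prefix maxima M; for each end j binary-search the
--     # smallest i with M[i] >= P[j] - target: (i, j] is the longest candidate ending at j.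
--     P = [0]
--     for j in range(len(arr)):
--         P.append(P[j] + arr[j])
--     M = [P[0]]
--     for i in range(1, len(P)):
--         M.append(max(M[i - 1], P[i]))
--     best = 0
--     for j in range(1, len(P)):
--         x = P[j] - target
--         lo, hi = 0, j
--         while lo < hi:
--             mid = (lo + hi) // 2
--             if M[mid] >= x:
--                 hi = mid
--             else:
--                 lo = mid + 1
--         if lo < j and j - lo > best:
--             best = j - lo
--     return best
-- ===== Notes on version B (the rewrite author's own statement) =====
-- stated objective: alternative
-- what changed: Replaces A's min-suffix-block compression plus sliding-window machinery with the classic prefix-sum formulation: for each end index, binary-search the running prefix-maximum array for the earliest start whose prefix sum is large enough.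
import Mathlib
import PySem

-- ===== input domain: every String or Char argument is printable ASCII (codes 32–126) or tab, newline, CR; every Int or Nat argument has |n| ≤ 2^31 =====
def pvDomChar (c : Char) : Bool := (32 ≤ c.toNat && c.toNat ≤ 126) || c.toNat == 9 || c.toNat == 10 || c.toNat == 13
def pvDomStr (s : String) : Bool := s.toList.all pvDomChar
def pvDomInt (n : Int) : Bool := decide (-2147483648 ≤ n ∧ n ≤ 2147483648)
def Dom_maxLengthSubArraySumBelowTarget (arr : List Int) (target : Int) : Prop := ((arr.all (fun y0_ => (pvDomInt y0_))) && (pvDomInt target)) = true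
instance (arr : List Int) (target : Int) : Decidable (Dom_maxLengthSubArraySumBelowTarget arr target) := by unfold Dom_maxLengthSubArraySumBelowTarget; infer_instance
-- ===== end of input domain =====

-- B replaces A's min-suffix-block compression + sliding-window machinery with the classic
-- prefix-sum formulation: for each end index, binary-search the running prefix-maximum
-- array for the earliest admissible start (an alternative algorithm, not claimed faster).

-- ===== PORT A =====
-- Python builds minSum/minSumEnd right-to-left; the initial `None` entries are always
-- overwritten before being read, so the port initialises with 0 instead.
def aPhase1 (arr : List Int) : Nat → List Int × List Nat → List Int × List Nat
  | 0, st => st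
  | k+1, st =>
    let msn := st.1.getD (k+1) 0
    if msn < 0 then
      aPhase1 arr k (st.1.set k (arr.getD k 0 + msn), st.2.set k (st.2.getD (k+1) 0))
    else
      aPhase1 arr k (st.1.set k (arr.getD k 0), st.2.set k k)

-- the inner `while` loop; fuel n+1 is enough since end strictly increases and stays ≤ n
def aWhile (ms : List Int) (me : List Nat) (n : Nat) (target : Int) : Nat → Nat → Int → Nat × Int
  | 0, endv, summ => (endv, summ)
  | fuel+1, endv, summ =>
    if endv < n ∧ summ + ms.getD endv 0 ≤ target then
      aWhile ms me n target fuel (me.getD endv 0 + 1) (summ + ms.getD endv 0)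
    else (endv, summ)

def aPhase2 (arr : List Int) (ms : List Int) (me : List Nat) (n : Nat) (target : Int) : Nat → Nat → Nat × Int × Int → Int
  | 0, _, st => st.2.2
  | k+1, i, st =>
    let w := aWhile ms me n target (n+1) st.1 st.2.1
    let res := max st.2.2 ((w.1 : Int) - (i : Int))
    if i < w.1 then aPhase2 arr ms me n target k (i+1) (w.1, w.2 - arr.getD i 0, res)
    else aPhase2 arr ms me n target k (i+1) (i+1, w.2, res)

def maxLengthSubArraySumBelowTarget (arr : List Int) (target : Int) : Int :=
  match arr with
  | [] => 0  -- Python raises IndexError here (`minSum[-1] = arr[-1]`); excluded by Pre_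
  | _ :: _ =>
    let n := arr.length
    let ms0 := (List.replicate n (0:Int)).set (n-1) (arr.getD (n-1) 0)
    let me0 := (List.replicate n (0:Nat)).set (n-1) (n-1)
    let p := aPhase1 arr (n-1) (ms0, me0)
    aPhase2 arr p.1 p.2 n target n 0 (0, 0, 0)

-- ===== PORT B =====
-- `for j in range(len(arr)): P.append(P[j] + arr[j])` (k counts the remaining iterations)
def bPrefix (arr : List Int) : Nat → Nat → List Int → List Int
  | 0, _, P => P
  | k+1, j, P => bPrefix arr k (j+1) (P ++ [P.getD j 0 + arr.getD j 0])

-- `for i in range(1, len(P)): M.append(max(M[i-1], P[i]))`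
def bMax (P : List Int) : Nat → Nat → List Int → List Int
  | 0, _, M => M
  | k+1, i, M => bMax P k (i+1) (M ++ [max (M.getD (i-1) 0) (P.getD i 0)])

-- `while lo < hi: mid = (lo + hi) // 2; ...` (lo, hi are nonnegative, so Nat division is exact)
def bSearch (M : List Int) (x : Int) (lo hi : Nat) : Nat :=
  if _h : lo < hi then
    let mid := (lo + hi) / 2
    if x ≤ M.getD mid 0 then bSearch M x lo mid else bSearch M x (mid+1) hi
  else lo
termination_by hi - lo
decreasing_by all_goals omega

-- `for j in range(1, len(P)): ...`
def bLoop (P M : List Int) (target : Int) : Nat → Nat → Int → Int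
  | 0, _, best => best
  | k+1, j, best =>
    let x := P.getD j 0 - target
    let lo := bSearch M x 0 j
    let best' := if lo < j ∧ (j:Int) - (lo:Int) > best then (j:Int) - (lo:Int) else best
    bLoop P M target k (j+1) best'

def maxLengthSubArraySumBelowTarget_alt (arr : List Int) (target : Int) : Int :=
  let P := bPrefix arr arr.length 0 [0]
  let M := bMax P (P.length - 1) 1 [P.getD 0 0]
  bLoop P M target (P.length - 1) 1 0

-- ===== PRECONDITION & SPEC =====
-- A raises IndexError on the empty list (it reads arr[-1]); Pre_ excludes exactly that
-- input (B, written naturally, returns 0 there).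
def Pre_maxLengthSubArraySumBelowTarget (arr : List Int) (target : Int) : Prop := arr ≠ []
instance (arr : List Int) (target : Int) : Decidable (Pre_maxLengthSubArraySumBelowTarget arr target) := by unfold Pre_maxLengthSubArraySumBelowTarget; infer_instance
def pvWitness_maxLengthSubArraySumBelowTarget : List Int × Int := ([1, -2, 3], 2)

def Spec_maxLengthSubArraySumBelowTarget (arr : List Int) (target : Int) (out : Int) : Prop := out = maxLengthSubArraySumBelowTarget_alt arr target
instance (arr : List Int) (target : Int) (out : Int) : Decidable (Spec_maxLengthSubArraySumBelowTarget arr target out) := by unfold Spec_maxLengthSubArraySumBelowTarget; infer_instance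

-- ===== CLAIM (what is proved, stated in full; the proofs are below) =====
def Claim_equal_maxLengthSubArraySumBelowTarget : Prop := ∀ (arr : List Int) (target : Int), Dom_maxLengthSubArraySumBelowTarget arr target → Pre_maxLengthSubArraySumBelowTarget arr target → Spec_maxLengthSubArraySumBelowTarget arr target (maxLengthSubArraySumBelowTarget arr target)

-- ===== LEMMAS AND PROOFS =====

-- sum of arr[i..j) and the common characterisation both programs are proved to satisfy
def pvS (arr : List Int) (i j : Nat) : Int := ∑ k ∈ Finset.Ico i j, arr.getD k 0
def pvValid (arr : List Int) (target : Int) (i j : Nat) : Prop :=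
  i < j ∧ j ≤ arr.length ∧ pvS arr i j ≤ target
def pvSound (arr : List Int) (target : Int) (r : Int) : Prop :=
  0 ≤ r ∧ (r = 0 ∨ ∃ i j, pvValid arr target i j ∧ r = (j:Int) - (i:Int))
def pvComplete (arr : List Int) (target : Int) (r : Int) : Prop :=
  ∀ i j, pvValid arr target i j → (j:Int) - (i:Int) ≤ r

theorem pvS_self (arr : List Int) (i : Nat) : pvS arr i i = 0 := by
  simp [pvS]

theorem pvS_succ_top (arr : List Int) {i j : Nat} (h : i ≤ j) :
    pvS arr i (j+1) = pvS arr i j + arr.getD j 0 := by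
  simp [pvS, Finset.sum_Ico_succ_top h]

theorem pvS_succ_bot (arr : List Int) {i j : Nat} (h : i < j) :
    pvS arr i j = arr.getD i 0 + pvS arr (i+1) j := by
  simp [pvS, Finset.sum_eq_sum_Ico_succ_bot h]

theorem pvS_split (arr : List Int) {i e j : Nat} (h1 : i ≤ e) (h2 : e ≤ j) :
    pvS arr i e + pvS arr e j = pvS arr i j := by
  simp [pvS, Finset.sum_Ico_consecutive _ h1 h2]

theorem pvUnique {arr : List Int} {target : Int} {r1 r2 : Int}
    (s1 : pvSound arr target r1) (c1 : pvComplete arr target r1)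
    (s2 : pvSound arr target r2) (c2 : pvComplete arr target r2) : r1 = r2 := by
  have h12 : r1 ≤ r2 := by
    rcases s1.2 with h | ⟨i, j, hv, rfl⟩
    · exact h ▸ s2.1
    · exact c2 i j hv
  have h21 : r2 ≤ r1 := by
    rcases s2.2 with h | ⟨i, j, hv, rfl⟩
    · exact h ▸ s1.1
    · exact c1 i j hv
  omega

-- ---- phase 1: the minimal-suffix-sum blocks, functionally ----
def pvMF (arr : List Int) (i : Nat) : Int × Nat :=
  if h : i + 1 < arr.length then
    let p := pvMF arr (i+1)
    if p.1 < 0 then (arr.getD i 0 + p.1, p.2) else (arr.getD i 0, i)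
  else (arr.getD i 0, i)
termination_by arr.length - i

theorem pvGetD_set_self {a : Type} {l : List a} {k : Nat} {v d : a} (h : k < l.length) :
    (l.set k v).getD k d = v := by
  simp [List.getD_eq_getElem?_getD, h]

theorem pvGetD_set_ne {a : Type} {l : List a} {i k : Nat} {v d : a} (h : i ≠ k) :
    (l.set k v).getD i d = l.getD i d := by
  simp [List.getD_eq_getElem?_getD, List.getElem?_set, Ne.symm h]

theorem pvMF_step_lt {arr : List Int} {i : Nat} (h1 : i+1 < arr.length) (h2 : (pvMF arr (i+1)).1 < 0) :
    pvMF arr i = (arr.getD i 0 + (pvMF arr (i+1)).1, (pvMF arr (i+1)).2) := by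
  rw [pvMF]; simp [h1, h2]

theorem pvMF_step_ge {arr : List Int} {i : Nat} (h1 : i+1 < arr.length) (h2 : ¬ (pvMF arr (i+1)).1 < 0) :
    pvMF arr i = (arr.getD i 0, i) := by
  rw [pvMF]; simp [h1, h2]

theorem pvMF_end_ge (arr : List Int) (i : Nat) : i ≤ (pvMF arr i).2 := by
  fun_induction pvMF arr i with
  | case1 i h p hc ih => simp only [p] at *; omega
  | case2 i h p hc ih => simp
  | case3 i h => simp

theorem pvMF_end_lt (arr : List Int) {i : Nat} (h : i < arr.length) : (pvMF arr i).2 < arr.length := by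
  fun_induction pvMF arr i with
  | case1 i h1 p hc ih => simp only [p] at *; exact ih h1
  | case2 i h1 p hc ih => simpa using h
  | case3 i h1 => simpa using h

theorem pvMF_sum (arr : List Int) (i : Nat) : (pvMF arr i).1 = pvS arr i ((pvMF arr i).2 + 1) := by
  fun_induction pvMF arr i with
  | case1 i h p hc ih =>
    simp only [p] at *
    have hge := pvMF_end_ge arr (i+1)
    rw [pvS_succ_bot arr (by omega : i < (pvMF arr (i+1)).2 + 1)]
    omega
  | case2 i h p hc ih =>
    show arr.getD i 0 = pvS arr i (i+1)
    rw [pvS_succ_bot arr (Nat.lt_succ_self i), pvS_self]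
    ring
  | case3 i h =>
    show arr.getD i 0 = pvS arr i (i+1)
    rw [pvS_succ_bot arr (Nat.lt_succ_self i), pvS_self]
    ring

theorem pvMF_min (arr : List Int) (i : Nat) :
    ∀ j, i ≤ j → j < arr.length → (pvMF arr i).1 ≤ pvS arr i (j+1) := by
  fun_induction pvMF arr i with
  | case1 i h p hc ih =>
    intro j hij hj
    simp only [p] at *
    rcases eq_or_lt_of_le hij with rfl | hlt
    · rw [pvS_succ_bot arr (Nat.lt_succ_self i), pvS_self]; omega
    · have := ih j hlt hj
      rw [pvS_succ_bot arr (by omega : i < j + 1)]; omega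
  | case2 i h p hc ih =>
    intro j hij hj
    simp only [p] at *
    rcases eq_or_lt_of_le hij with rfl | hlt
    · rw [pvS_succ_bot arr (Nat.lt_succ_self i), pvS_self]; omega
    · have h1 := ih j hlt hj
      rw [pvS_succ_bot arr (by omega : i < j + 1)]; omega
  | case3 i h =>
    intro j hij hj
    have : j = i := by omega
    subst this
    rw [pvS_succ_bot arr (Nat.lt_succ_self j), pvS_self]
    simp

theorem aPhase1_spec (arr : List Int) :
    ∀ k (ms : List Int) (me : List Nat), k ≤ arr.length - 1 →
    ms.length = arr.length → me.length = arr.length →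
    (∀ i, k ≤ i → i < arr.length → ms.getD i 0 = (pvMF arr i).1 ∧ me.getD i 0 = (pvMF arr i).2) →
    ∀ i, i < arr.length →
      (aPhase1 arr k (ms, me)).1.getD i 0 = (pvMF arr i).1 ∧
      (aPhase1 arr k (ms, me)).2.getD i 0 = (pvMF arr i).2 := by
  intro k
  induction k with
  | zero => intro ms me _ _ _ H i hi; exact H i (Nat.zero_le i) hi
  | succ k IH =>
    intro ms me hk hlms hlme H i hi
    have hk1 : k + 1 < arr.length := by omega
    obtain ⟨hm, he⟩ := H (k+1) (le_refl _) hk1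
    by_cases hc : ms.getD (k+1) 0 < 0
    · have hc' : (pvMF arr (k+1)).1 < 0 := hm ▸ hc
      have step : aPhase1 arr (k+1) (ms, me)
          = aPhase1 arr k (ms.set k (arr.getD k 0 + ms.getD (k+1) 0), me.set k (me.getD (k+1) 0)) := by
        simp only [aPhase1]; rw [if_pos hc]
      rw [step]
      refine IH _ _ (by omega) (by simp [hlms]) (by simp [hlme]) ?_ i hi
      intro i' hki hi'
      rcases eq_or_lt_of_le hki with rfl | hgt
      · rw [pvGetD_set_self (by omega), pvGetD_set_self (by omega), pvMF_step_lt hk1 hc', hm, he]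
        exact ⟨rfl, rfl⟩
      · rw [pvGetD_set_ne (by omega), pvGetD_set_ne (by omega)]
        exact H i' (by omega) hi'
    · have hc' : ¬ (pvMF arr (k+1)).1 < 0 := hm ▸ hc
      have step : aPhase1 arr (k+1) (ms, me)
          = aPhase1 arr k (ms.set k (arr.getD k 0), me.set k k) := by
        simp only [aPhase1]; rw [if_neg hc]
      rw [step]
      refine IH _ _ (by omega) (by simp [hlms]) (by simp [hlme]) ?_ i hi
      intro i' hki hi'
      rcases eq_or_lt_of_le hki with rfl | hgt
      · rw [pvGetD_set_self (by omega), pvGetD_set_self (by omega), pvMF_step_ge hk1 hc']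
        exact ⟨rfl, rfl⟩
      · rw [pvGetD_set_ne (by omega), pvGetD_set_ne (by omega)]
        exact H i' (by omega) hi'

-- ---- phase 2 ----
theorem aWhile_sound (arr : List Int) (target : Int) {ms : List Int} {me : List Nat}
    (hms : ∀ e, e < arr.length → ms.getD e 0 = (pvMF arr e).1)
    (hme : ∀ e, e < arr.length → me.getD e 0 = (pvMF arr e).2) :
    ∀ fuel endv summ i, i ≤ endv → endv ≤ arr.length → summ = pvS arr i endv →
    endv ≤ (aWhile ms me arr.length target fuel endv summ).1 ∧
    (aWhile ms me arr.length target fuel endv summ).1 ≤ arr.length ∧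
    (aWhile ms me arr.length target fuel endv summ).2 = pvS arr i (aWhile ms me arr.length target fuel endv summ).1 ∧
    ((aWhile ms me arr.length target fuel endv summ).1 = endv ∨ pvS arr i (aWhile ms me arr.length target fuel endv summ).1 ≤ target) := by
  intro fuel
  induction fuel with
  | zero =>
    intro endv summ i hie hen hs
    simp only [aWhile]
    exact ⟨le_refl _, hen, hs, Or.inl trivial⟩
  | succ fuel IH =>
    intro endv summ i hie hen hs
    by_cases hcond : endv < arr.length ∧ summ + ms.getD endv 0 ≤ target
    · have hmsv : ms.getD endv 0 = (pvMF arr endv).1 := hms endv hcond.1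
      have hmev : me.getD endv 0 = (pvMF arr endv).2 := hme endv hcond.1
      have hEge : endv ≤ (pvMF arr endv).2 := pvMF_end_ge arr endv
      have hElt : (pvMF arr endv).2 < arr.length := pvMF_end_lt arr hcond.1
      have hsum : summ + ms.getD endv 0 = pvS arr i ((pvMF arr endv).2 + 1) := by
        rw [hmsv, pvMF_sum arr endv, hs,
          pvS_split arr hie (by omega : endv ≤ (pvMF arr endv).2 + 1)]
      have step : aWhile ms me arr.length target (fuel+1) endv summ
          = aWhile ms me arr.length target fuel (me.getD endv 0 + 1) (summ + ms.getD endv 0) := by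
        simp only [aWhile]; rw [if_pos hcond]
      rw [step]
      have IH' := IH (me.getD endv 0 + 1) (summ + ms.getD endv 0) i
        (by omega) (by omega : me.getD endv 0 + 1 ≤ arr.length) (by rw [hsum, hmev])
      refine ⟨by omega, IH'.2.1, IH'.2.2.1, ?_⟩
      rcases IH'.2.2.2 with heq | hle
      · right
        rw [heq, hmev, ← hsum]
        exact hcond.2
      · exact Or.inr hle
    · have step : aWhile ms me arr.length target (fuel+1) endv summ = (endv, summ) := by
        simp only [aWhile]; rw [if_neg hcond]
      rw [step]
      exact ⟨le_refl _, hen, hs, Or.inl rfl⟩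

theorem aWhile_complete (arr : List Int) (target : Int) {ms : List Int} {me : List Nat}
    (hms : ∀ e, e < arr.length → ms.getD e 0 = (pvMF arr e).1)
    (hme : ∀ e, e < arr.length → me.getD e 0 = (pvMF arr e).2)
    {istar jstar : Nat} (hv : pvValid arr target istar jstar) :
    ∀ fuel endv summ, istar ≤ endv → endv ≤ arr.length → summ = pvS arr istar endv →
    jstar ≤ endv + fuel →
    jstar ≤ (aWhile ms me arr.length target fuel endv summ).1 := by
  intro fuel
  induction fuel with
  | zero =>
    intro endv summ hie hen hs hfuel
    simp only [aWhile]
    omega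
  | succ fuel IH =>
    intro endv summ hie hen hs hfuel
    rcases Nat.lt_or_ge endv jstar with hje | hje
    · have hen' : endv < arr.length := by
        have := hv.2.1
        omega
      have hcond : endv < arr.length ∧ summ + ms.getD endv 0 ≤ target := by
        refine ⟨hen', ?_⟩
        have hmin := pvMF_min arr endv (jstar - 1) (by omega) (by have := hv.2.1; omega)
        have hj1 : jstar - 1 + 1 = jstar := by omega
        rw [hj1] at hmin
        have hsp := pvS_split arr hie (by omega : endv ≤ jstar)
        have := hv.2.2
        rw [hms endv hen', hs]
        omega
      have hmev : me.getD endv 0 = (pvMF arr endv).2 := hme endv hen'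
      have hEge : endv ≤ (pvMF arr endv).2 := pvMF_end_ge arr endv
      have hElt : (pvMF arr endv).2 < arr.length := pvMF_end_lt arr hen'
      have hsum : summ + ms.getD endv 0 = pvS arr istar ((pvMF arr endv).2 + 1) := by
        rw [hms endv hen', pvMF_sum arr endv, hs,
          pvS_split arr hie (by omega : endv ≤ (pvMF arr endv).2 + 1)]
      have step : aWhile ms me arr.length target (fuel+1) endv summ
          = aWhile ms me arr.length target fuel (me.getD endv 0 + 1) (summ + ms.getD endv 0) := by
        simp only [aWhile]; rw [if_pos hcond]
      rw [step]
      exact IH (me.getD endv 0 + 1) (summ + ms.getD endv 0)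
        (by omega) (by omega) (by rw [hsum, hmev]) (by omega)
    · have W := aWhile_sound arr target hms hme (fuel+1) endv summ istar hie hen hs
      omega

theorem aPhase2_sound (arr : List Int) (target : Int) {ms : List Int} {me : List Nat}
    (hms : ∀ e, e < arr.length → ms.getD e 0 = (pvMF arr e).1)
    (hme : ∀ e, e < arr.length → me.getD e 0 = (pvMF arr e).2) :
    ∀ k i endv summ res, i + k = arr.length → i ≤ endv → endv ≤ arr.length →
    summ = pvS arr i endv → pvSound arr target res →
    ((endv:Int) - (i:Int) ≤ res ∨ pvS arr i endv ≤ target) →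
    pvSound arr target (aPhase2 arr ms me arr.length target k i (endv, summ, res)) := by
  intro k
  induction k with
  | zero =>
    intro i endv summ res _ _ _ _ hres _
    exact hres
  | succ k IH =>
    intro i endv summ res hkn hie hen hs hres hdisj
    have W := aWhile_sound arr target hms hme (arr.length+1) endv summ i hie hen hs
    have hsplit : aPhase2 arr ms me arr.length target (k+1) i (endv, summ, res)
        = (if i < (aWhile ms me arr.length target (arr.length+1) endv summ).1 then
            aPhase2 arr ms me arr.length target k (i+1)
              ((aWhile ms me arr.length target (arr.length+1) endv summ).1,
               (aWhile ms me arr.length target (arr.length+1) endv summ).2 - arr.getD i 0,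
               max res (((aWhile ms me arr.length target (arr.length+1) endv summ).1 : Int) - (i:Int)))
          else
            aPhase2 arr ms me arr.length target k (i+1)
              (i+1, (aWhile ms me arr.length target (arr.length+1) endv summ).2,
               max res (((aWhile ms me arr.length target (arr.length+1) endv summ).1 : Int) - (i:Int)))) := by
      simp only [aPhase2]
    set E := aWhile ms me arr.length target (arr.length+1) endv summ with hE
    have hres' : pvSound arr target (max res ((E.1:Int) - (i:Int))) := by
      by_cases hcase : (E.1:Int) - (i:Int) ≤ res
      · rwa [max_eq_left hcase]
      · have hlt : res < (E.1:Int) - (i:Int) := by omega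
        have h0 := hres.1
        have hiE : i < E.1 := by omega
        have htg : pvS arr i E.1 ≤ target := by
          rcases W.2.2.2 with heq | h2
          · rcases hdisj with h3 | h3
            · exfalso; omega
            · rwa [heq]
          · exact h2
        refine ⟨le_trans h0 (le_max_left _ _), Or.inr ⟨i, E.1, ⟨hiE, W.2.1, htg⟩, ?_⟩⟩
        rw [max_eq_right (le_of_lt hlt)]
    rw [hsplit]
    by_cases hbr : i < E.1
    · rw [if_pos hbr]
      refine IH (i+1) E.1 (E.2 - arr.getD i 0) _ (by omega) (by omega) W.2.1 ?_ hres' ?_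
      · have h1 := W.2.2.1
        have h2 := pvS_succ_bot arr hbr
        omega
      · left
        have := le_max_right res ((E.1:Int) - (i:Int))
        push_cast
        omega
    · rw [if_neg hbr]
      have hEi : E.1 = i := by
        have := W.1
        omega
      refine IH (i+1) (i+1) E.2 _ (by omega) (le_refl _) (by omega) ?_ hres' ?_
      · rw [W.2.2.1, hEi, pvS_self, pvS_self]
      · left
        have := le_trans hres.1 (le_max_left res ((E.1:Int) - (i:Int)))
        push_cast
        omega

theorem aPhase2_res_le (arr : List Int) (ms : List Int) (me : List Nat) (n : Nat) (target : Int) :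
    ∀ k i st, st.2.2 ≤ aPhase2 arr ms me n target k i st := by
  intro k
  induction k with
  | zero => intro i st; exact le_refl _
  | succ k IH =>
    intro i st
    simp only [aPhase2]
    split
    · exact le_trans (le_max_left _ _) (IH (i+1) _)
    · exact le_trans (le_max_left _ _) (IH (i+1) _)

theorem aPhase2_complete (arr : List Int) (target : Int) {ms : List Int} {me : List Nat}
    (hms : ∀ e, e < arr.length → ms.getD e 0 = (pvMF arr e).1)
    (hme : ∀ e, e < arr.length → me.getD e 0 = (pvMF arr e).2)
    {istar jstar : Nat} (hv : pvValid arr target istar jstar) :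
    ∀ k i endv summ res, i + k = arr.length → i ≤ istar → i ≤ endv → endv ≤ arr.length →
    summ = pvS arr i endv →
    (jstar:Int) - (istar:Int) ≤ aPhase2 arr ms me arr.length target k i (endv, summ, res) := by
  intro k
  induction k with
  | zero =>
    intro i endv summ res hkn hii hie hen hs
    exfalso
    have := hv.1
    have := hv.2.1
    omega
  | succ k IH =>
    intro i endv summ res hkn hii hie hen hs
    have W := aWhile_sound arr target hms hme (arr.length+1) endv summ i hie hen hs
    have hsplit : aPhase2 arr ms me arr.length target (k+1) i (endv, summ, res)
        = (if i < (aWhile ms me arr.length target (arr.length+1) endv summ).1 then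
            aPhase2 arr ms me arr.length target k (i+1)
              ((aWhile ms me arr.length target (arr.length+1) endv summ).1,
               (aWhile ms me arr.length target (arr.length+1) endv summ).2 - arr.getD i 0,
               max res (((aWhile ms me arr.length target (arr.length+1) endv summ).1 : Int) - (i:Int)))
          else
            aPhase2 arr ms me arr.length target k (i+1)
              (i+1, (aWhile ms me arr.length target (arr.length+1) endv summ).2,
               max res (((aWhile ms me arr.length target (arr.length+1) endv summ).1 : Int) - (i:Int)))) := by
      simp only [aPhase2]
    set E := aWhile ms me arr.length target (arr.length+1) endv summ with hE
    rw [hsplit]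
    rcases eq_or_lt_of_le hii with heq | hlt
    · subst heq
      have hj : jstar ≤ E.1 := by
        refine aWhile_complete arr target hms hme hv (arr.length+1) endv summ hie hen hs ?_
        have := hv.2.1
        omega
      have hmax := le_max_right res ((E.1:Int) - (i:Int))
      by_cases hbr : i < E.1
      · rw [if_pos hbr]
        refine le_trans ?_ (aPhase2_res_le arr ms me arr.length target k (i+1) _)
        show (jstar:Int) - (i:Int) ≤ max res ((E.1:Int) - (i:Int))
        omega
      · rw [if_neg hbr]
        refine le_trans ?_ (aPhase2_res_le arr ms me arr.length target k (i+1) _)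
        show (jstar:Int) - (i:Int) ≤ max res ((E.1:Int) - (i:Int))
        omega
    · by_cases hbr : i < E.1
      · rw [if_pos hbr]
        refine IH (i+1) E.1 (E.2 - arr.getD i 0) _ (by omega) (by omega) (by omega) W.2.1 ?_
        have h1 := W.2.2.1
        have h2 := pvS_succ_bot arr hbr
        omega
      · rw [if_neg hbr]
        have hEi : E.1 = i := by
          have := W.1
          omega
        refine IH (i+1) (i+1) E.2 _ (by omega) (by omega) (le_refl _) (by omega) ?_
        rw [W.2.2.1, hEi, pvS_self, pvS_self]

theorem a_sound_complete (arr : List Int) (target : Int) (h : arr ≠ []) :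
    pvSound arr target (maxLengthSubArraySumBelowTarget arr target) ∧
    pvComplete arr target (maxLengthSubArraySumBelowTarget arr target) := by
  obtain ⟨x, xs, rfl⟩ : ∃ x xs, arr = x :: xs := by
    cases arr with
    | nil => exact absurd rfl h
    | cons x xs => exact ⟨x, xs, rfl⟩
  set arr := x :: xs with harr
  have hn1 : 1 ≤ arr.length := by simp [harr]
  have hunfold : maxLengthSubArraySumBelowTarget arr target
      = aPhase2 arr (aPhase1 arr (arr.length - 1)
          ((List.replicate arr.length (0:Int)).set (arr.length-1) (arr.getD (arr.length-1) 0),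
           (List.replicate arr.length (0:Nat)).set (arr.length-1) (arr.length-1))).1
        (aPhase1 arr (arr.length - 1)
          ((List.replicate arr.length (0:Int)).set (arr.length-1) (arr.getD (arr.length-1) 0),
           (List.replicate arr.length (0:Nat)).set (arr.length-1) (arr.length-1))).2
        arr.length target arr.length 0 (0, 0, 0) := rfl
  have hmfLast : pvMF arr (arr.length - 1) = (arr.getD (arr.length - 1) 0, arr.length - 1) := by
    rw [pvMF]
    have : ¬ (arr.length - 1 + 1 < arr.length) := by omega
    simp [this]
  have hP := aPhase1_spec arr (arr.length - 1)
    ((List.replicate arr.length (0:Int)).set (arr.length-1) (arr.getD (arr.length-1) 0))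
    ((List.replicate arr.length (0:Nat)).set (arr.length-1) (arr.length-1))
    (le_refl _)
    (by simp)
    (by simp)
    (by
      intro i hki hi
      have hieq : i = arr.length - 1 := by omega
      subst hieq
      rw [pvGetD_set_self (by simp; omega), pvGetD_set_self (by simp; omega), hmfLast]
      exact ⟨rfl, rfl⟩)
  have hms : ∀ e, e < arr.length →
      (aPhase1 arr (arr.length - 1)
          ((List.replicate arr.length (0:Int)).set (arr.length-1) (arr.getD (arr.length-1) 0),
           (List.replicate arr.length (0:Nat)).set (arr.length-1) (arr.length-1))).1.getD e 0
        = (pvMF arr e).1 := fun e he => (hP e he).1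
  have hme : ∀ e, e < arr.length →
      (aPhase1 arr (arr.length - 1)
          ((List.replicate arr.length (0:Int)).set (arr.length-1) (arr.getD (arr.length-1) 0),
           (List.replicate arr.length (0:Nat)).set (arr.length-1) (arr.length-1))).2.getD e 0
        = (pvMF arr e).2 := fun e he => (hP e he).2
  constructor
  · rw [hunfold]
    refine aPhase2_sound arr target hms hme arr.length 0 0 0 0 (by omega) (le_refl _) (by omega)
      (pvS_self arr 0).symm ⟨le_refl _, Or.inl rfl⟩ (Or.inl (by omega))
  · intro i j hvij
    rw [hunfold]
    exact aPhase2_complete arr target hms hme hvij arr.length 0 0 0 0 (by omega) (Nat.zero_le _)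
      (le_refl _) (by omega) (pvS_self arr 0).symm

-- ---- B ----
theorem pvGetD_append_lt {l l' : List Int} {t : Nat} {d : Int} (h : t < l.length) :
    (l ++ l').getD t d = l.getD t d := by
  simp [List.getD_eq_getElem?_getD, List.getElem?_append_left h]

theorem pvGetD_concat_self {l : List Int} {v d : Int} :
    (l ++ [v]).getD l.length d = v := by
  simp [List.getD_eq_getElem?_getD, List.getElem?_append_right (le_refl l.length)]

theorem bPrefix_spec (arr : List Int) :
    ∀ k j P, j + k = arr.length → P.length = j + 1 →
    (∀ t, t ≤ j → P.getD t 0 = pvS arr 0 t) →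
    (bPrefix arr k j P).length = arr.length + 1 ∧
    (∀ t, t ≤ arr.length → (bPrefix arr k j P).getD t 0 = pvS arr 0 t) := by
  intro k
  induction k with
  | zero =>
    intro j P hjk hlen hP
    have : j = arr.length := by omega
    subst this
    exact ⟨by simpa using hlen, fun t ht => hP t ht⟩
  | succ k IH =>
    intro j P hjk hlen hP
    have step : bPrefix arr (k+1) j P
        = bPrefix arr k (j+1) (P ++ [P.getD j 0 + arr.getD j 0]) := by
      simp only [bPrefix]
    rw [step]
    refine IH (j+1) _ (by omega) (by simp [hlen]) ?_
    intro t ht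
    rcases Nat.lt_or_ge t (j+1) with hlt | hge
    · rw [pvGetD_append_lt (by omega)]
      rw [hP t (by omega)]
    · have hteq : t = j + 1 := by omega
      subst hteq
      have hcat : (P ++ [P.getD j 0 + arr.getD j 0]).getD (j+1) 0 = P.getD j 0 + arr.getD j 0 := by
        rw [← hlen]
        exact pvGetD_concat_self
      rw [hcat, hP j (le_refl j), pvS_succ_top arr (Nat.zero_le j)]

theorem bMax_spec (P : List Int) :
    ∀ k i M, i + k = P.length → M.length = i → 1 ≤ i →
    (∀ t, t < i → (t = 0 → M.getD 0 0 = P.getD 0 0) ∧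
      (0 < t → M.getD t 0 = max (M.getD (t-1) 0) (P.getD t 0))) →
    (bMax P k i M).length = P.length ∧
    (∀ t, t < P.length → ((bMax P k i M).getD 0 0 = P.getD 0 0) ∧
      (0 < t → (bMax P k i M).getD t 0 = max ((bMax P k i M).getD (t-1) 0) (P.getD t 0))) := by
  intro k
  induction k with
  | zero =>
    intro i M hik hlen h1 hspec
    have : i = P.length := by omega
    subst this
    refine ⟨hlen, fun t ht => ⟨(hspec 0 (by omega)).1 rfl, fun h0 => (hspec t ht).2 h0⟩⟩
  | succ k IH =>
    intro i M hik hlen h1 hspec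
    have step : bMax P (k+1) i M
        = bMax P k (i+1) (M ++ [max (M.getD (i-1) 0) (P.getD i 0)]) := by
      simp only [bMax]
    rw [step]
    refine IH (i+1) _ (by omega) (by simp [hlen]) (by omega) ?_
    intro t ht
    rcases Nat.lt_or_ge t i with hlt | hge
    · constructor
      · intro ht0
        rw [pvGetD_append_lt (by omega)]
        exact (hspec t hlt).1 ht0
      · intro h0
        rw [pvGetD_append_lt (by omega), pvGetD_append_lt (by omega)]
        exact (hspec t hlt).2 h0
    · have hteq : t = i := by omega
      subst hteq
      constructor
      · intro ht0
        omega
      · intro _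
        have hcat : (M ++ [max (M.getD (t-1) 0) (P.getD t 0)]).getD t 0
            = max (M.getD (t-1) 0) (P.getD t 0) := by
          rw [← hlen]
          exact pvGetD_concat_self
        rw [hcat, pvGetD_append_lt (by omega)]

theorem bM_mono {P R : List Int}
    (hspec : ∀ t, t < P.length → (R.getD 0 0 = P.getD 0 0) ∧
      (0 < t → R.getD t 0 = max (R.getD (t-1) 0) (P.getD t 0))) :
    ∀ u t, t ≤ u → u < P.length → R.getD t 0 ≤ R.getD u 0 := by
  intro u
  induction u with
  | zero =>
    intro t ht _
    have : t = 0 := by omega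
    subst this
    exact le_refl _
  | succ u IH =>
    intro t ht hu
    rcases Nat.lt_or_ge t (u+1) with hlt | hge
    · have hstep := (hspec (u+1) hu).2 (by omega)
      have : R.getD u 0 ≤ R.getD (u+1) 0 := by
        rw [hstep]
        simpa using le_max_left _ _
      exact le_trans (IH t (by omega) (by omega)) this
    · have : t = u + 1 := by omega
      subst this
      exact le_refl _

theorem bM_ge {P R : List Int}
    (hspec : ∀ t, t < P.length → (R.getD 0 0 = P.getD 0 0) ∧
      (0 < t → R.getD t 0 = max (R.getD (t-1) 0) (P.getD t 0))) :
    ∀ t, t < P.length → P.getD t 0 ≤ R.getD t 0 := by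
  intro t ht
  rcases Nat.eq_zero_or_pos t with rfl | h0
  · rw [(hspec 0 ht).1]
  · rw [(hspec t ht).2 h0]
    exact le_max_right _ _

theorem bM_eq_or {P R : List Int}
    (hspec : ∀ t, t < P.length → (R.getD 0 0 = P.getD 0 0) ∧
      (0 < t → R.getD t 0 = max (R.getD (t-1) 0) (P.getD t 0))) :
    ∀ t, t < P.length → R.getD t 0 = P.getD t 0 ∨ (0 < t ∧ R.getD t 0 = R.getD (t-1) 0) := by
  intro t ht
  rcases Nat.eq_zero_or_pos t with rfl | h0
  · exact Or.inl ((hspec 0 ht).1)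
  · have h := (hspec t ht).2 h0
    rcases max_choice (R.getD (t-1) 0) (P.getD t 0) with hm | hm
    · exact Or.inr ⟨h0, by rw [h, hm]⟩
    · exact Or.inl (by rw [h, hm])

theorem bSearch_spec {M : List Int} {x : Int} {N : Nat}
    (hmono : ∀ t u, t ≤ u → u < N → M.getD t 0 ≤ M.getD u 0) :
    ∀ lo hi, lo ≤ hi → hi ≤ N →
    lo ≤ bSearch M x lo hi ∧ bSearch M x lo hi ≤ hi ∧
    (bSearch M x lo hi < hi → x ≤ M.getD (bSearch M x lo hi) 0) ∧
    (∀ t, lo ≤ t → t < bSearch M x lo hi → M.getD t 0 < x) := by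
  intro lo hi
  fun_induction bSearch M x lo hi with
  | case1 lo hi hlh mid hx ih =>
    intro _ hhiN
    have hmid1 : lo ≤ mid := by simp only [mid]; omega
    have hmid2 : mid < hi := by simp only [mid]; omega
    obtain ⟨i1, i2, i3, i4⟩ := ih hmid1 (by omega)
    refine ⟨i1, by omega, ?_, i4⟩
    intro _
    rcases Nat.lt_or_ge (bSearch M x lo mid) mid with hr | hr
    · exact i3 hr
    · have : bSearch M x lo mid = mid := by omega
      rw [this]
      exact hx
  | case2 lo hi hlh mid hx ih =>
    intro _ hhiN
    have hmid1 : lo ≤ mid := by simp only [mid]; omega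
    have hmid2 : mid < hi := by simp only [mid]; omega
    obtain ⟨i1, i2, i3, i4⟩ := ih (by omega) hhiN
    refine ⟨by omega, i2, i3, ?_⟩
    intro t hlot htr
    rcases Nat.lt_or_ge t (mid+1) with hts | hts
    · have : M.getD t 0 ≤ M.getD mid 0 := hmono t mid (by omega) (by omega)
      omega
    · exact i4 t hts htr
  | case3 lo hi hlh =>
    intro hlohi _
    have : lo = hi := by omega
    exact ⟨le_refl _, by omega, by omega, by omega⟩

theorem bLoop_ge (P M : List Int) (target : Int) :
    ∀ k j best, best ≤ bLoop P M target k j best := by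
  intro k
  induction k with
  | zero => intro j best; exact le_refl _
  | succ k IH =>
    intro j best
    simp only [bLoop]
    refine le_trans ?_ (IH (j+1) _)
    split_ifs with hc
    · omega
    · exact le_refl _

theorem bLoop_sound (arr : List Int) (target : Int) {P M : List Int}
    (hP : ∀ t, t ≤ arr.length → P.getD t 0 = pvS arr 0 t)
    (hmono : ∀ t u, t ≤ u → u ≤ arr.length → M.getD t 0 ≤ M.getD u 0)
    (heq : ∀ t, t ≤ arr.length → M.getD t 0 = P.getD t 0 ∨ (0 < t ∧ M.getD t 0 = M.getD (t-1) 0)) :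
    ∀ k j best, j + k = arr.length + 1 → 1 ≤ j → pvSound arr target best →
    pvSound arr target (bLoop P M target k j best) := by
  intro k
  induction k with
  | zero => intro j best _ _ hb; exact hb
  | succ k IH =>
    intro j best hjk h1 hb
    have hjn : j ≤ arr.length := by omega
    have hmono' : ∀ t u, t ≤ u → u < arr.length + 1 → M.getD t 0 ≤ M.getD u 0 :=
      fun t u htu hu => hmono t u htu (by omega)
    obtain ⟨s1, s2, s3, s4⟩ := @bSearch_spec M (P.getD j 0 - target) (arr.length + 1) hmono' 0 j (Nat.zero_le j) (by omega)
    simp only [bLoop]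
    refine IH (j+1) _ (by omega) (by omega) ?_
    split_ifs with hc
    · have hlo : bSearch M (P.getD j 0 - target) 0 j < j := hc.1
      have hxM : P.getD j 0 - target ≤ M.getD (bSearch M (P.getD j 0 - target) 0 j) 0 := s3 hlo
      have hxP : P.getD j 0 - target ≤ P.getD (bSearch M (P.getD j 0 - target) 0 j) 0 := by
        rcases heq (bSearch M (P.getD j 0 - target) 0 j) (by omega) with he | ⟨hpos, he⟩
        · rwa [he] at hxM
        · have := s4 (bSearch M (P.getD j 0 - target) 0 j - 1) (Nat.zero_le _) (by omega)
          omega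
      have hsum : pvS arr (bSearch M (P.getD j 0 - target) 0 j) j ≤ target := by
        have hsp := pvS_split arr (Nat.zero_le (bSearch M (P.getD j 0 - target) 0 j))
          (le_of_lt hlo)
        have h1 := hP j hjn
        have h2 := hP (bSearch M (P.getD j 0 - target) 0 j) (by omega)
        omega
      refine ⟨by omega, Or.inr ⟨bSearch M (P.getD j 0 - target) 0 j, j, ⟨hlo, hjn, hsum⟩, rfl⟩⟩
    · exact hb

theorem bLoop_complete (arr : List Int) (target : Int) {P M : List Int}
    (hP : ∀ t, t ≤ arr.length → P.getD t 0 = pvS arr 0 t)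
    (hmono : ∀ t u, t ≤ u → u ≤ arr.length → M.getD t 0 ≤ M.getD u 0)
    (hge : ∀ t, t ≤ arr.length → P.getD t 0 ≤ M.getD t 0)
    {istar jstar : Nat} (hv : pvValid arr target istar jstar) :
    ∀ k j best, j + k = arr.length + 1 → j ≤ jstar →
    (jstar:Int) - (istar:Int) ≤ bLoop P M target k j best := by
  intro k
  induction k with
  | zero =>
    intro j best hjk hjj
    exfalso
    have := hv.2.1
    omega
  | succ k IH =>
    intro j best hjk hjj
    rcases eq_or_lt_of_le hjj with heqj | hltj
    · subst heqj
      have hjn : j ≤ arr.length := hv.2.1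
      have hmono' : ∀ t u, t ≤ u → u < arr.length + 1 → M.getD t 0 ≤ M.getD u 0 :=
        fun t u htu hu => hmono t u htu (by omega)
      obtain ⟨s1, s2, s3, s4⟩ := @bSearch_spec M (P.getD j 0 - target) (arr.length + 1) hmono' 0 j (Nat.zero_le j) (by omega)
      have histar : istar < j := hv.1
      have hxP : P.getD j 0 - target ≤ P.getD istar 0 := by
        have hsp := pvS_split arr (Nat.zero_le istar) (le_of_lt histar)
        have h1 := hP j hjn
        have h2 := hP istar (by omega)
        have := hv.2.2
        omega
      have hxM : P.getD j 0 - target ≤ M.getD istar 0 :=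
        le_trans hxP (hge istar (by omega))
      have hloi : bSearch M (P.getD j 0 - target) 0 j ≤ istar := by
        by_contra hcon
        have := s4 istar (Nat.zero_le _) (by omega)
        omega
      simp only [bLoop]
      refine le_trans ?_ (bLoop_ge P M target k (j+1) _)
      split_ifs with hc
      · push_cast
        omega
      · push_cast at hc
        omega
    · simp only [bLoop]
      exact IH (j+1) _ (by omega) hltj

theorem b_sound_complete (arr : List Int) (target : Int) :
    pvSound arr target (maxLengthSubArraySumBelowTarget_alt arr target) ∧
    pvComplete arr target (maxLengthSubArraySumBelowTarget_alt arr target) := by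
  have hPfacts := bPrefix_spec arr arr.length 0 [0] (by omega) (by simp)
    (by
      intro t ht
      have : t = 0 := by omega
      subst this
      simp [pvS_self])
  obtain ⟨hPlen, hP⟩ := hPfacts
  have hMfacts := bMax_spec (bPrefix arr arr.length 0 [0])
    ((bPrefix arr arr.length 0 [0]).length - 1) 1
    [(bPrefix arr arr.length 0 [0]).getD 0 0]
    (by omega) (by simp) (le_refl 1)
    (by
      intro t ht
      have : t = 0 := by omega
      subst this
      exact ⟨fun _ => by simp, fun h0 => absurd h0 (by omega)⟩)
  obtain ⟨hMlen, hMspec⟩ := hMfacts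
  have hmono : ∀ t u, t ≤ u → u ≤ arr.length →
      (bMax (bPrefix arr arr.length 0 [0]) ((bPrefix arr arr.length 0 [0]).length - 1) 1
        [(bPrefix arr arr.length 0 [0]).getD 0 0]).getD t 0 ≤
      (bMax (bPrefix arr arr.length 0 [0]) ((bPrefix arr arr.length 0 [0]).length - 1) 1
        [(bPrefix arr arr.length 0 [0]).getD 0 0]).getD u 0 :=
    fun t u htu hu => bM_mono hMspec u t htu (by omega)
  have hge : ∀ t, t ≤ arr.length →
      (bPrefix arr arr.length 0 [0]).getD t 0 ≤
      (bMax (bPrefix arr arr.length 0 [0]) ((bPrefix arr arr.length 0 [0]).length - 1) 1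
        [(bPrefix arr arr.length 0 [0]).getD 0 0]).getD t 0 :=
    fun t ht => bM_ge hMspec t (by omega)
  have heq : ∀ t, t ≤ arr.length →
      (bMax (bPrefix arr arr.length 0 [0]) ((bPrefix arr arr.length 0 [0]).length - 1) 1
        [(bPrefix arr arr.length 0 [0]).getD 0 0]).getD t 0
        = (bPrefix arr arr.length 0 [0]).getD t 0 ∨
      (0 < t ∧ (bMax (bPrefix arr arr.length 0 [0]) ((bPrefix arr arr.length 0 [0]).length - 1) 1
        [(bPrefix arr arr.length 0 [0]).getD 0 0]).getD t 0
        = (bMax (bPrefix arr arr.length 0 [0]) ((bPrefix arr arr.length 0 [0]).length - 1) 1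
        [(bPrefix arr arr.length 0 [0]).getD 0 0]).getD (t-1) 0) :=
    fun t ht => bM_eq_or hMspec t (by omega)
  have hunfold : maxLengthSubArraySumBelowTarget_alt arr target
      = bLoop (bPrefix arr arr.length 0 [0])
          (bMax (bPrefix arr arr.length 0 [0]) ((bPrefix arr arr.length 0 [0]).length - 1) 1
            [(bPrefix arr arr.length 0 [0]).getD 0 0])
          target ((bPrefix arr arr.length 0 [0]).length - 1) 1 0 := rfl
  have hk : (bPrefix arr arr.length 0 [0]).length - 1 = arr.length := by omega
  rw [hk] at hmono hge heq
  constructor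
  · rw [hunfold, hk]
    exact bLoop_sound arr target hP hmono heq arr.length 1 0 (by omega) (le_refl 1)
      ⟨le_refl 0, Or.inl rfl⟩
  · intro i j hvij
    rw [hunfold, hk]
    have h1j : 1 ≤ j := by
      have := hvij.1
      omega
    exact bLoop_complete arr target hP hmono hge hvij arr.length 1 0 (by omega) h1j

-- ===== VERDICT (by name: the statement is the Claim_ definition above) =====
theorem maxLengthSubArraySumBelowTarget_spec : Claim_equal_maxLengthSubArraySumBelowTarget := by
  intro arr target _ hpre
  have ha := a_sound_complete arr target hpre
  have hb := b_sound_complete arr target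
  exact pvUnique ha.1 ha.2 hb.1 hb.2
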